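-- pv_equiv track=rewrite | github.com/xinyiwan/OS_CNN | src/main_tune_v2.py | _build_data_tuple
-- ===== SOURCE A (Python) =====
-- def _build_data_tuple(image_files, segmentation_files, labels, subjects, keep_subjects):
--     idx = [i for i, s in enumerate(subjects) if s in keep_subjects]
--     return (
--         [image_files[i] for i in idx],
--         [segmentation_files[i] for i in idx],
--         [labels[i] for i in idx],
--         [subjects[i] for i in idx],
--     )
-- ===== SOURCE B (Python) =====
-- def _build_data_tuple(image_files, segmentation_files, labels, subjects, keep_subjects):
--     keep = set(keep_subjects)
--     rows = [row for row in zip(image_files, segmentation_files, labels, subjects)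
--             if row[3] in keep]
--     return ([r[0] for r in rows],
--             [r[1] for r in rows],
--             [r[2] for r in rows],
--             [r[3] for r in rows])
-- ===== Notes on version B (the rewrite author's own statement) =====
-- stated objective: alternative
-- what changed: Instead of building an index table over subjects and then indexing each of the four lists by it, B zips the four lists into a single list of records, filters the records by subject membership in a set, and projects the columns back out - no positional indexing at all.
import Mathlib
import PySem

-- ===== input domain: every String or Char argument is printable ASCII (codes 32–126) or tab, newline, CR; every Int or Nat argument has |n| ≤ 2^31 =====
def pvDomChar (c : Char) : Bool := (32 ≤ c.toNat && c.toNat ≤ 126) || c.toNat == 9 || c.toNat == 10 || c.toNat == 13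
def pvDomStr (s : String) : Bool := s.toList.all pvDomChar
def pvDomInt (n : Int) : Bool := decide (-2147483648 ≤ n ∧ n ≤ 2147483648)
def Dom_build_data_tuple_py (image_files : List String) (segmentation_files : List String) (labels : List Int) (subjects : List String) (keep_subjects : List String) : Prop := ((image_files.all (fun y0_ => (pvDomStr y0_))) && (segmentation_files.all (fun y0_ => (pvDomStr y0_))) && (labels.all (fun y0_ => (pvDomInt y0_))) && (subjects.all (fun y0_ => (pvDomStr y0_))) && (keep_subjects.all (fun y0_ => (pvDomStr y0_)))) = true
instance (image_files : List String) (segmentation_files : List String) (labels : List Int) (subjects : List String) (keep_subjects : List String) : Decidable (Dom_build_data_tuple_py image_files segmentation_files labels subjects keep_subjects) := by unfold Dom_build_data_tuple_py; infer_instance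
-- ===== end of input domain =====

-- B zips the four lists into records, filters the records by subject membership in a set, and
-- projects the columns back out (alternative decomposition: no index table, no positional indexing).

-- ===== PORT A =====
def build_data_tuple_py (image_files : List String) (segmentation_files : List String) (labels : List Int) (subjects : List String) (keep_subjects : List String) : List String × List String × List Int × List String :=
  let idx : List Int := ((PySem.List.enumerate subjects).filter (fun p => keep_subjects.contains p.2)).map (fun p => p.1)
  (idx.map (fun i => PySem.List.pyGetD image_files i ""),
   idx.map (fun i => PySem.List.pyGetD segmentation_files i ""),
   idx.map (fun i => PySem.List.pyGetD labels i 0),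
   idx.map (fun i => PySem.List.pyGetD subjects i ""))

-- ===== PORT B =====
-- zip(image_files, segmentation_files, labels, subjects): 4-way zip, truncating at the shortest list
def pvZip4 : List String → List String → List Int → List String → List (String × String × Int × String)
  | im :: ims, sg :: sgs, lb :: lbs, sb :: sbs => (im, sg, lb, sb) :: pvZip4 ims sgs lbs sbs
  | _, _, _, _ => []

def build_data_tuple_py_alt (image_files : List String) (segmentation_files : List String) (labels : List Int) (subjects : List String) (keep_subjects : List String) : List String × List String × List Int × List String :=
  let keep := PySem.Set.ofList keep_subjects
  let rows := (pvZip4 image_files segmentation_files labels subjects).filter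
    (fun row => PySem.Set.contains keep row.2.2.2)
  (rows.map (fun r => r.1), rows.map (fun r => r.2.1), rows.map (fun r => r.2.2.1), rows.map (fun r => r.2.2.2))

-- ===== PRECONDITION & SPEC =====
-- Pre_ excludes exactly the inputs where some kept index of subjects is out of range of
-- image_files / segmentation_files / labels, on which Python A raises IndexError.
def Pre_build_data_tuple_py (image_files : List String) (segmentation_files : List String) (labels : List Int) (subjects : List String) (keep_subjects : List String) : Prop :=
  ∀ i < subjects.length, subjects.getD i "" ∈ keep_subjects →
    i < image_files.length ∧ i < segmentation_files.length ∧ i < labels.length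
instance (image_files : List String) (segmentation_files : List String) (labels : List Int) (subjects : List String) (keep_subjects : List String) : Decidable (Pre_build_data_tuple_py image_files segmentation_files labels subjects keep_subjects) := by unfold Pre_build_data_tuple_py; infer_instance
def pvWitness_build_data_tuple_py : List String × List String × List Int × List String × List String :=
  (["img1", "img2"], ["seg1", "seg2"], [0, 1], ["s1", "s2"], ["s2"])

def Spec_build_data_tuple_py (image_files : List String) (segmentation_files : List String) (labels : List Int) (subjects : List String) (keep_subjects : List String) (out : List String × List String × List Int × List String) : Prop := out = build_data_tuple_py_alt image_files segmentation_files labels subjects keep_subjects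
instance (image_files : List String) (segmentation_files : List String) (labels : List Int) (subjects : List String) (keep_subjects : List String) (out : List String × List String × List Int × List String) : Decidable (Spec_build_data_tuple_py image_files segmentation_files labels subjects keep_subjects out) := by unfold Spec_build_data_tuple_py; infer_instance

-- ===== CLAIM (what is proved, stated in full; the proofs are below) =====
def Claim_equal_build_data_tuple_py : Prop := ∀ (image_files : List String) (segmentation_files : List String) (labels : List Int) (subjects : List String) (keep_subjects : List String), Dom_build_data_tuple_py image_files segmentation_files labels subjects keep_subjects → Pre_build_data_tuple_py image_files segmentation_files labels subjects keep_subjects → Spec_build_data_tuple_py image_files segmentation_files labels subjects keep_subjects (build_data_tuple_py image_files segmentation_files labels subjects keep_subjects)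
-- ===== LEMMAS AND PROOFS =====

theorem pv_witness_ok : Dom_build_data_tuple_py (pvWitness_build_data_tuple_py.1) (pvWitness_build_data_tuple_py.2.1) (pvWitness_build_data_tuple_py.2.2.1) (pvWitness_build_data_tuple_py.2.2.2.1) (pvWitness_build_data_tuple_py.2.2.2.2) ∧ Pre_build_data_tuple_py (pvWitness_build_data_tuple_py.1) (pvWitness_build_data_tuple_py.2.1) (pvWitness_build_data_tuple_py.2.2.1) (pvWitness_build_data_tuple_py.2.2.2.1) (pvWitness_build_data_tuple_py.2.2.2.2) := by
  decide

-- membership in the set equals membership in the original list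
theorem pv_contains (ks : List String) (s : String) :
    PySem.Set.contains (PySem.Set.ofList ks) s = ks.contains s := by
  simp [PySem.Set.contains_eq_listContains, PySem.Set.mem_ofList]

-- A's index list is the (Nat) range of positions filtered by membership, cast to Int.
theorem pv_A_eq (image_files segmentation_files : List String) (labels : List Int) (subjects keep_subjects : List String) :
    build_data_tuple_py image_files segmentation_files labels subjects keep_subjects =
      (let F := (List.range subjects.length).filter (fun i => keep_subjects.contains (subjects.getD i ""))
       (F.map (fun i => image_files.getD i ""),
        F.map (fun i => segmentation_files.getD i ""),
        F.map (fun i => labels.getD i 0),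
        F.map (fun i => subjects.getD i ""))) := by
  unfold build_data_tuple_py
  rw [PySem.List.enumerate_eq_map_pyRange (d := "")]
  simp [PySem.List.len, PySem.List.pyRange_zero_natCast, List.filter_map, List.map_map,
    Function.comp_def]

-- The core equivalence: the filtered index table projected through getD equals
-- the zipped rows filtered by subject, column by column, under Pre_.
theorem pv_main : ∀ (sb im sg : List String) (lb : List Int) (ks : List String),
    (∀ i : Nat, i < sb.length → ks.contains (sb.getD i "") = true →
      i < im.length ∧ i < sg.length ∧ i < lb.length) →
    (((List.range sb.length).filter (fun i => ks.contains (sb.getD i ""))).map (fun i => im.getD i ""),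
     ((List.range sb.length).filter (fun i => ks.contains (sb.getD i ""))).map (fun i => sg.getD i ""),
     ((List.range sb.length).filter (fun i => ks.contains (sb.getD i ""))).map (fun i => lb.getD i 0),
     ((List.range sb.length).filter (fun i => ks.contains (sb.getD i ""))).map (fun i => sb.getD i ""))
    = (((pvZip4 im sg lb sb).filter (fun r => ks.contains r.2.2.2)).map (fun r => r.1),
       ((pvZip4 im sg lb sb).filter (fun r => ks.contains r.2.2.2)).map (fun r => r.2.1),
       ((pvZip4 im sg lb sb).filter (fun r => ks.contains r.2.2.2)).map (fun r => r.2.2.1),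
       ((pvZip4 im sg lb sb).filter (fun r => ks.contains r.2.2.2)).map (fun r => r.2.2.2)) := by
  intro sb
  induction sb with
  | nil =>
    intro im sg lb ks _
    cases im <;> cases sg <;> cases lb <;> simp [pvZip4]
  | cons s sbt ih =>
      intro im sg lb ks hP
      have hrange : List.range (sbt.length + 1) = 0 :: (List.range sbt.length).map Nat.succ := by
        simp [List.range_succ_eq_map]
      by_cases hks : ks.contains s = true
      · have hmem : s ∈ ks := by simpa using hks
        obtain ⟨h1, h2, h3⟩ := hP 0 (by simp) (by simpa using hks)
        rcases im with _ | ⟨i0, imt⟩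
        · simp at h1
        rcases sg with _ | ⟨g0, sgt⟩
        · simp at h2
        rcases lb with _ | ⟨l0, lbt⟩
        · simp at h3
        have hPt : ∀ i : Nat, i < sbt.length → ks.contains (sbt.getD i "") = true →
            i < imt.length ∧ i < sgt.length ∧ i < lbt.length := by
          intro i hi hc
          have := hP (i + 1) (by simpa using Nat.succ_lt_succ hi) (by simpa using hc)
          simpa using this
        have hIH := ih imt sgt lbt ks hPt
        simp [List.filter_map, Function.comp_def, Nat.succ_eq_add_one] at hIH
        obtain ⟨e1, e2, e3, e4⟩ := hIH
        simp [hrange, hmem, List.filter_map, Function.comp_def, pvZip4, Nat.succ_eq_add_one]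
        exact ⟨e1, e2, e3, e4⟩
      · have hnmem : s ∉ ks := by simpa using hks
        have hF : ∀ (n1 n2 n3 : Nat), (n1 = 0 ∨ n2 = 0 ∨ n3 = 0) →
            (∀ i : Nat, i < sbt.length → ks.contains (sbt.getD i "") = true →
              i + 1 < n1 ∧ i + 1 < n2 ∧ i + 1 < n3) →
            (List.range sbt.length).filter (fun i => ks.contains (sbt.getD i "")) = [] := by
          intro n1 n2 n3 hz hPP
          apply List.filter_eq_nil_iff.mpr
          intro i hi
          rw [List.mem_range] at hi
          simp only [Bool.not_eq_true]
          by_contra hcc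
          have hc : ks.contains (sbt.getD i "") = true := by
            revert hcc; cases ks.contains (sbt.getD i "") <;> simp
          have := hPP i hi hc
          omega
        have hFmem : ∀ (n1 n2 n3 : Nat), (n1 = 0 ∨ n2 = 0 ∨ n3 = 0) →
            (∀ i : Nat, i < sbt.length → ks.contains (sbt.getD i "") = true →
              i + 1 < n1 ∧ i + 1 < n2 ∧ i + 1 < n3) →
            ∀ a : Nat, a < sbt.length → sbt[a]?.getD "" ∉ ks := by
          intro n1 n2 n3 hz hPP a ha
          have := List.filter_eq_nil_iff.mp (hF n1 n2 n3 hz hPP) a (List.mem_range.mpr ha)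
          simpa using this
        have hPP : ∀ i : Nat, i < sbt.length → ks.contains (sbt.getD i "") = true →
            i + 1 < im.length ∧ i + 1 < sg.length ∧ i + 1 < lb.length := by
          intro i hi hc
          have := hP (i + 1) (by simpa using Nat.succ_lt_succ hi) (by simpa using hc)
          simpa using this
        rcases im with _ | ⟨i0, imt⟩
        · have h0 := hF 0 sg.length lb.length (by omega) (by simpa using hPP)
          have h0' := hFmem 0 sg.length lb.length (by omega) (by simpa using hPP)
          simp [hrange, hnmem, List.filter_map, Function.comp_def, pvZip4, h0]
          exact h0'
        rcases sg with _ | ⟨g0, sgt⟩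
        · have h0 := hF (imt.length + 1) 0 lb.length (by omega) (by simpa using hPP)
          have h0' := hFmem (imt.length + 1) 0 lb.length (by omega) (by simpa using hPP)
          simp [hrange, hnmem, List.filter_map, Function.comp_def, pvZip4, h0]
          exact h0'
        rcases lb with _ | ⟨l0, lbt⟩
        · have h0 := hF (imt.length + 1) (sgt.length + 1) 0 (by omega) (by simpa using hPP)
          have h0' := hFmem (imt.length + 1) (sgt.length + 1) 0 (by omega) (by simpa using hPP)
          simp [hrange, hnmem, List.filter_map, Function.comp_def, pvZip4, h0]
          exact h0'
        have hPt : ∀ i : Nat, i < sbt.length → ks.contains (sbt.getD i "") = true →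
            i < imt.length ∧ i < sgt.length ∧ i < lbt.length := by
          intro i hi hc
          have := hPP i hi hc
          simp at this
          omega
        have hIH := ih imt sgt lbt ks hPt
        simp [List.filter_map, Function.comp_def, Nat.succ_eq_add_one] at hIH
        obtain ⟨e1, e2, e3, e4⟩ := hIH
        simp [hrange, hnmem, List.filter_map, Function.comp_def, pvZip4, Nat.succ_eq_add_one]
        exact ⟨e1, e2, e3, e4⟩


-- ===== VERDICT (by name: the statement is the Claim_ definition above) =====
theorem build_data_tuple_py_spec : Claim_equal_build_data_tuple_py := by
  intro image_files segmentation_files labels subjects keep_subjects _ hPre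
  unfold Spec_build_data_tuple_py build_data_tuple_py_alt
  simp only [pv_contains]
  rw [pv_A_eq]
  exact pv_main subjects image_files segmentation_files labels keep_subjects
    (fun i hi hc => hPre i hi (by simpa using hc))
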